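-- pv_equiv track=rewrite | github.com/ilnrzakirov/piscine_python_django | day01/ex05/all_in.py | find_state
-- ===== SOURCE A (Python) =====
-- def find_state(input_value):
--     states = {
--         "Oregon": "OR",
--         "Alabama": "AL",
--         "New Jersey": "NJ",
--         "Colorado": "CO"
--     }
--
--     capital_cities = {
--         "OR": "Salem",
--         "AL": "Montgomery",
--         "NJ": "Trenton",
--         "CO": "Denver"
--     }
--     key_for_capital_cities = ""
--     for key, value in capital_cities.items():
--         if value.lower() == input_value.strip().title().lower():
--             key_for_capital_cities = key.lower()
--             break
--     for key, value in states.items():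
--         if key_for_capital_cities == value.lower():
--             return key
--     return None
-- ===== SOURCE B (Python) =====
-- CAPITAL_TO_STATE = {
--     "salem": "Oregon",
--     "montgomery": "Alabama",
--     "trenton": "New Jersey",
--     "denver": "Colorado",
-- }
--
--
-- def find_state(input_value):
--     return CAPITAL_TO_STATE.get(input_value.strip().lower())
-- ===== Notes on version B (the rewrite author's own statement) =====
-- stated objective: simpler
-- what changed: Replaces A's two sequential scans over a capitals dict and a states dict linked by a lowercased abbreviation key with one precomputed capital->state reverse index and a single dict lookup; the per-iteration strip().title().lower() of the input collapses to one strip().lower().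
import Mathlib
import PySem

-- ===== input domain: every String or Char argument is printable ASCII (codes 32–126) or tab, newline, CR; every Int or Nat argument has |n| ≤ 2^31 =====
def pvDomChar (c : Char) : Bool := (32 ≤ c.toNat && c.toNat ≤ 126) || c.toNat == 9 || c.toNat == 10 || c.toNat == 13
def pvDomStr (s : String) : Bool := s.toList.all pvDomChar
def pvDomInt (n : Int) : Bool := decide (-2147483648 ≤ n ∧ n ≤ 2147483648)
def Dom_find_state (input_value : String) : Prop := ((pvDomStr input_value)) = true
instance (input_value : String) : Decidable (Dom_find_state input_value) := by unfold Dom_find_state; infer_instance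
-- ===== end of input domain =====

-- B replaces A's two sequential dict scans (capital -> abbreviation -> state) with one
-- precomputed capital->state reverse index and a single dict lookup (objective: simpler).

-- ===== PORT A =====
-- hand port of Python str.title(): exact on ASCII, where "cased" characters are a-z/A-Z
def pyTitleGo (prevAlpha : Bool) : List Char → List Char
  | [] => []
  | c :: cs =>
    if PySem.Chars.isalpha c then
      (if prevAlpha then PySem.Chars.lowerChar c else PySem.Chars.upperChar c) :: pyTitleGo true cs
    else
      c :: pyTitleGo false cs

def pyTitle (cs : List Char) : List Char := pyTitleGo false cs

-- first loop of A: scan capital_cities.items(), on match return key.lower(), after the loop ""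
def findStateLoop1 (input_value : String) : List (String × String) → String
  | [] => ""
  | (k, v) :: rest =>
    if PySem.Str.lower v =
        String.ofList (PySem.Chars.lower (pyTitle (PySem.Chars.strip input_value.toList))) then
      PySem.Str.lower k
    else
      findStateLoop1 input_value rest

-- second loop of A: scan states.items(), return the key whose value.lower() matches
def findStateLoop2 (kfc : String) : List (String × String) → Option String
  | [] => none
  | (k, v) :: rest =>
    if kfc = PySem.Str.lower v then some k else findStateLoop2 kfc rest

def find_state (input_value : String) : Option String :=
  let states : List (String × String) :=
    [("Oregon", "OR"), ("Alabama", "AL"), ("New Jersey", "NJ"), ("Colorado", "CO")]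
  let capital_cities : List (String × String) :=
    [("OR", "Salem"), ("AL", "Montgomery"), ("NJ", "Trenton"), ("CO", "Denver")]
  let key_for_capital_cities := findStateLoop1 input_value capital_cities
  findStateLoop2 key_for_capital_cities states

-- ===== PORT B =====
def capitalToState : PySem.Dict String String :=
  ⟨[("salem", "Oregon"), ("montgomery", "Alabama"), ("trenton", "New Jersey"),
    ("denver", "Colorado")]⟩

def find_state_alt (input_value : String) : Option String :=
  PySem.Dict.get? capitalToState (PySem.Str.lower (PySem.Str.strip input_value))

-- ===== PRECONDITION & SPEC =====
def Spec_find_state (input_value : String) (out : Option String) : Prop := out = find_state_alt input_value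
instance (input_value : String) (out : Option String) : Decidable (Spec_find_state input_value out) := by unfold Spec_find_state; infer_instance

-- ===== CLAIM (what is proved, stated in full; the proofs are below) =====
def Claim_equal_find_state : Prop := ∀ (input_value : String), Dom_find_state input_value → Spec_find_state input_value (find_state input_value)

-- ===== LEMMAS AND PROOFS =====
theorem isupper_iff (c : Char) : PySem.Chars.isupper c = true ↔ 65 ≤ c.toNat ∧ c.toNat ≤ 90 := by
  simp only [PySem.Chars.isupper, Bool.and_eq_true, decide_eq_true_eq, Char.le_def, UInt32.le_iff_toNat_le]
  constructor <;> intro ⟨h1, h2⟩ <;> exact ⟨by exact_mod_cast h1, by exact_mod_cast h2⟩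

theorem islower_iff (c : Char) : PySem.Chars.islower c = true ↔ 97 ≤ c.toNat ∧ c.toNat ≤ 122 := by
  simp only [PySem.Chars.islower, Bool.and_eq_true, decide_eq_true_eq, Char.le_def, UInt32.le_iff_toNat_le]
  constructor <;> intro ⟨h1, h2⟩ <;> exact ⟨by exact_mod_cast h1, by exact_mod_cast h2⟩

theorem toNat_ofNat' (n : Nat) (h : n < 55296) : (Char.ofNat n).toNat = n := by
  rw [Char.toNat_ofNat]; simp [Nat.isValidChar]; omega

theorem lower_upper (c : Char) :
    PySem.Chars.lowerChar (PySem.Chars.upperChar c) = PySem.Chars.lowerChar c := by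
  unfold PySem.Chars.upperChar PySem.Chars.lowerChar
  by_cases hl : PySem.Chars.islower c = true
  · have hb := (islower_iff c).mp hl
    have ht : (Char.ofNat (c.toNat - 32)).toNat = c.toNat - 32 := toNat_ofNat' _ (by omega)
    have hup : PySem.Chars.isupper (Char.ofNat (c.toNat - 32)) = true := by
      rw [isupper_iff, ht]; omega
    have hnup : PySem.Chars.isupper c = false := by
      rw [Bool.eq_false_iff]; intro h; have := (isupper_iff c).mp h; omega
    simp only [hl, hup, hnup, if_true, Bool.false_eq_true, if_false, ht]
    have h32 : c.toNat - 32 + 32 = c.toNat := by omega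
    rw [h32, Char.ofNat_toNat]
  · simp only [hl, Bool.false_eq_true, if_false]

theorem lower_lower (c : Char) :
    PySem.Chars.lowerChar (PySem.Chars.lowerChar c) = PySem.Chars.lowerChar c := by
  unfold PySem.Chars.lowerChar
  by_cases hu : PySem.Chars.isupper c = true
  · have hb := (isupper_iff c).mp hu
    have ht : (Char.ofNat (c.toNat + 32)).toNat = c.toNat + 32 := toNat_ofNat' _ (by omega)
    have hn : PySem.Chars.isupper (Char.ofNat (c.toNat + 32)) = false := by
      rw [Bool.eq_false_iff]; intro h; have := (isupper_iff _).mp h; omega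
    simp only [hu, hn, if_true, Bool.false_eq_true, if_false]
  · simp only [hu, Bool.false_eq_true, if_false]

-- title changes only the case of letters, so lowercasing erases it
theorem lower_titleGo (p : Bool) (cs : List Char) :
    PySem.Chars.lower (pyTitleGo p cs) = PySem.Chars.lower cs := by
  induction cs generalizing p with
  | nil => rfl
  | cons c cs ih =>
    unfold pyTitleGo
    by_cases ha : PySem.Chars.isalpha c = true
    · simp only [ha, if_true, PySem.Chars.lower, List.map]
      have hc : PySem.Chars.lowerChar (if p then PySem.Chars.lowerChar c else PySem.Chars.upperChar c)
          = PySem.Chars.lowerChar c := by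
        cases p
        · simpa using lower_upper c
        · simpa using lower_lower c
      rw [hc]
      have := ih true
      simp only [PySem.Chars.lower] at this
      rw [this]
    · simp only [ha, Bool.false_eq_true, if_false, PySem.Chars.lower, List.map]
      have := ih false
      simp only [PySem.Chars.lower] at this
      rw [this]

theorem lower_title (cs : List Char) :
    PySem.Chars.lower (pyTitle cs) = PySem.Chars.lower cs := lower_titleGo false cs

-- the string A compares against equals input.strip().lower()
theorem title_key (s : String) :
    String.ofList (PySem.Chars.lower (pyTitle (PySem.Chars.strip s.toList)))
      = PySem.Str.lower (PySem.Str.strip s) := by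
  rw [lower_title]
  have : (PySem.Str.lower (PySem.Str.strip s)).toList
      = PySem.Chars.lower (PySem.Chars.strip s.toList) := by
    rw [PySem.Str.toList_lower, PySem.Str.toList_strip]
  rw [← this]
  exact String.ofList_toList

-- ===== VERDICT (by name: the statement is the Claim_ definition above) =====
theorem find_state_spec : Claim_equal_find_state := by
  intro input_value _
  unfold Spec_find_state find_state find_state_alt
  simp only [findStateLoop1, findStateLoop2, title_key]
  set k := PySem.Str.lower (PySem.Str.strip input_value) with hk
  by_cases h1 : PySem.Str.lower "Salem" = k
  · rw [if_pos h1, ← h1]; decide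
  by_cases h2 : PySem.Str.lower "Montgomery" = k
  · rw [if_neg h1, if_pos h2, ← h2]; decide
  by_cases h3 : PySem.Str.lower "Trenton" = k
  · rw [if_neg h1, if_neg h2, if_pos h3, ← h3]; decide
  by_cases h4 : PySem.Str.lower "Denver" = k
  · rw [if_neg h1, if_neg h2, if_neg h3, if_pos h4, ← h4]; decide
  · rw [if_neg h1, if_neg h2, if_neg h3, if_neg h4]
    have e1 : PySem.Str.lower "Salem" = "salem" := by decide
    have e2 : PySem.Str.lower "Montgomery" = "montgomery" := by decide
    have e3 : PySem.Str.lower "Trenton" = "trenton" := by decide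
    have e4 : PySem.Str.lower "Denver" = "denver" := by decide
    rw [e1] at h1; rw [e2] at h2; rw [e3] at h3; rw [e4] at h4
    have b1 : ("salem" == k) = false := beq_eq_false_iff_ne.mpr h1
    have b2 : ("montgomery" == k) = false := beq_eq_false_iff_ne.mpr h2
    have b3 : ("trenton" == k) = false := beq_eq_false_iff_ne.mpr h3
    have b4 : ("denver" == k) = false := beq_eq_false_iff_ne.mpr h4
    simp only [PySem.Dict.get?, capitalToState, List.find?, b1, b2, b3, b4]
    decide
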